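-- pv_equiv track=rewrite | github.com/SKenb/PyFlow | PyFlow/Measurements.py | reduceDataToTimeRange
-- ===== SOURCE A (Python) =====
-- def reduceDataToTimeRange(data, timeKey, startTime, endTime):
--     if timeKey not in data: raise KeyError(f"Time key '{timeKey}' not found in data.")
--
--     reducedData = {key: [] for key in data}
--     for i, t in enumerate(data[timeKey]):
--         if startTime <= t <= endTime:
--             for key in data:
--                 reducedData[key].append(data[key][i])
--
--     return reducedData
-- ===== SOURCE B (Python) =====
-- def reduceDataToTimeRange(data, timeKey, startTime, endTime):
--     if timeKey not in data: raise KeyError(f"Time key '{timeKey}' not found in data.")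
--     keys = list(data)
--     ti = keys.index(timeKey)
--     rows = [row for row in zip(*(data[k] for k in keys)) if startTime <= row[ti] <= endTime]
--     cols = zip(*rows) if rows else [()] * len(keys)
--     return {k: list(col) for k, col in zip(keys, cols)}
-- ===== Notes on version B (the rewrite author's own statement) =====
-- stated objective: alternative
-- what changed: B transposes the columnar dict into row tuples with zip(*...), filters whole rows by the time field, and transposes the surviving rows back into columns, instead of A's row-by-row fold that appends each field to every column inside the time loop.
import Mathlib
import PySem

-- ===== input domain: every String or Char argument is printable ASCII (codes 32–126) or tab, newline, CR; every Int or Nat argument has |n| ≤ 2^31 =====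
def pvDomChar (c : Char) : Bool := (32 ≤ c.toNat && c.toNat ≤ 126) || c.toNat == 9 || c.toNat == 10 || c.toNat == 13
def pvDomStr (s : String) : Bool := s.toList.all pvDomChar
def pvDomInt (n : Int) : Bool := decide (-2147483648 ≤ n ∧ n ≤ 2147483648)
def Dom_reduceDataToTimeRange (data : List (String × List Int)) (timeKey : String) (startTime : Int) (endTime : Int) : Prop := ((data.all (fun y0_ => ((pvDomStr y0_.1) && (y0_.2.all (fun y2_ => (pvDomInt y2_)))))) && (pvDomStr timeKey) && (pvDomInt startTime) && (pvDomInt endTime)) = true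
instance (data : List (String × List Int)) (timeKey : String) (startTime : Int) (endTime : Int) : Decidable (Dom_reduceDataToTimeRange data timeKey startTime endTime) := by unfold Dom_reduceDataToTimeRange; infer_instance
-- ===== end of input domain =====

-- B replaces A's column-appending fold by transpose → filter rows → transpose back (objective: alternative); equivalence proved on Pre_ below.
-- ===== PORT A =====
-- data[key][i] in Python raises IndexError out of range; the port totalizes with getD 0 — such inputs are excluded by Pre_.
def pvColGet (c : List Int) (i : Int) : Int := (PySem.List.pyGet? c i).getD 0

def reduceDataToTimeRange (data : List (String × List Int)) (timeKey : String) (startTime : Int) (endTime : Int) : List (String × List Int) :=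
  match data.lookup timeKey with
  | none => []  -- Python raises KeyError here; excluded by Pre_
  | some tc =>
    (PySem.List.enumerate tc).foldl
      (fun acc p =>
        if startTime ≤ p.2 ∧ p.2 ≤ endTime then
          acc.map (fun kl => (kl.1, kl.2 ++ [pvColGet ((data.lookup kl.1).getD []) p.1]))
        else acc)
      (data.map (fun kc => (kc.1, ([] : List Int))))

-- ===== PORT B =====
-- pyZip ls = list(zip(*ls)): truncates to the shortest list, empty when ls is empty.
-- Structural fuel recursion (fuel = length of the first list bounds the number of rows zip can emit);
-- the fuel is only a totality guard: pyZip_eq below is the exact zip recurrence.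
def pyZipGo : Nat → List (List Int) → List (List Int)
  | 0, _ => []
  | n+1, ls =>
    if ls ≠ [] ∧ ls.all (fun l => !l.isEmpty) then
      (ls.map (fun l => l.headI)) :: pyZipGo n (ls.map List.tail)
    else []

def pyZip (ls : List (List Int)) : List (List Int) := pyZipGo ls.headI.length ls

def reduceDataToTimeRange_alt (data : List (String × List Int)) (timeKey : String) (startTime : Int) (endTime : Int) : List (String × List Int) :=
  let keys := data.map (·.1)
  if keys.contains timeKey then
    let ti : Int := ((keys.idxOf timeKey : Nat) : Int)
    -- row[ti] always exists (rows have len(keys) fields); the port totalizes with getD 0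
    let rows := (pyZip (data.map (·.2))).filter
      (fun row => decide (startTime ≤ (PySem.List.pyGet? row ti).getD 0 ∧ (PySem.List.pyGet? row ti).getD 0 ≤ endTime))
    let cols := if rows.isEmpty then List.replicate keys.length ([] : List Int) else pyZip rows
    keys.zip cols
  else []  -- Python raises KeyError here; excluded by Pre_

-- ===== PRECONDITION & SPEC =====
-- Pre_ excludes: (a) timeKey absent (Python A raises KeyError); (b) a column too short at some
-- in-range time index (Python A raises IndexError); and (c) association lists with duplicate
-- keys, which cannot arise from a Python dict argument (A still returns on the collapsed dict).
def Pre_reduceDataToTimeRange (data : List (String × List Int)) (timeKey : String) (startTime : Int) (endTime : Int) : Prop :=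
  (data.map Prod.fst).Nodup ∧ (∃ kc ∈ data, kc.1 = timeKey) ∧
  ∀ kc ∈ data, kc.1 = timeKey →
    ∀ p ∈ PySem.List.enumerate kc.2, (startTime ≤ p.2 ∧ p.2 ≤ endTime) →
      ∀ kc' ∈ data, p.1 < (kc'.2.length : Int)
instance (data : List (String × List Int)) (timeKey : String) (startTime : Int) (endTime : Int) : Decidable (Pre_reduceDataToTimeRange data timeKey startTime endTime) := by unfold Pre_reduceDataToTimeRange; infer_instance

def pvWitness_reduceDataToTimeRange : (List (String × List Int)) × String × Int × Int :=
  ([("t", [1, 2, 3]), ("v", [10, 20, 30])], "t", 1, 2)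

def Spec_reduceDataToTimeRange (data : List (String × List Int)) (timeKey : String) (startTime : Int) (endTime : Int) (out : List (String × List Int)) : Prop := out = reduceDataToTimeRange_alt data timeKey startTime endTime
instance (data : List (String × List Int)) (timeKey : String) (startTime : Int) (endTime : Int) (out : List (String × List Int)) : Decidable (Spec_reduceDataToTimeRange data timeKey startTime endTime out) := by unfold Spec_reduceDataToTimeRange; infer_instance

-- ===== CLAIM (what is proved, stated in full; the proofs are below) =====
def Claim_equal_reduceDataToTimeRange : Prop := ∀ (data : List (String × List Int)) (timeKey : String) (startTime : Int) (endTime : Int), Dom_reduceDataToTimeRange data timeKey startTime endTime → Pre_reduceDataToTimeRange data timeKey startTime endTime → Spec_reduceDataToTimeRange data timeKey startTime endTime (reduceDataToTimeRange data timeKey startTime endTime)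
-- ===== LEMMAS AND PROOFS =====
-- Fuel insensitivity and the exact recurrence for pyZip.
theorem pv_pyZipGo_nil (k : Nat) (ls : List (List Int))
    (hc : ¬ (ls ≠ [] ∧ ls.all (fun l => !l.isEmpty))) : pyZipGo k ls = [] := by
  cases k with
  | zero => rfl
  | succ k => simp only [pyZipGo, if_neg hc]

theorem pv_headI_pos (ls : List (List Int)) (hc : ls ≠ [] ∧ ls.all (fun l => !l.isEmpty)) :
    0 < ls.headI.length := by
  obtain ⟨hne, hall⟩ := hc
  cases ls with
  | nil => exact absurd rfl hne
  | cons x xs =>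
    have hx := List.all_eq_true.mp hall x (List.mem_cons_self ..)
    cases x with
    | nil => simp at hx
    | cons a r => simp [List.headI]

theorem pv_headI_tail (ls : List (List Int)) (hne : ls ≠ []) :
    (ls.map List.tail).headI.length = ls.headI.length - 1 := by
  cases ls with
  | nil => exact absurd rfl hne
  | cons x xs => simp [List.headI, List.length_tail]

theorem pv_pyZipGo_fuel : ∀ (n m : Nat) (ls : List (List Int)),
    ls.headI.length ≤ n → ls.headI.length ≤ m → pyZipGo n ls = pyZipGo m ls := by
  intro n
  induction n with
  | zero =>
    intro m ls hn _
    have hc : ¬ (ls ≠ [] ∧ ls.all (fun l => !l.isEmpty)) := by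
      intro hc
      have := pv_headI_pos ls hc
      omega
    rw [pv_pyZipGo_nil 0 ls hc, pv_pyZipGo_nil m ls hc]
  | succ n ih =>
    intro m ls hn hm
    by_cases hc : ls ≠ [] ∧ ls.all (fun l => !l.isEmpty)
    · have hpos := pv_headI_pos ls hc
      cases m with
      | zero => omega
      | succ m =>
        simp only [pyZipGo, if_pos hc]
        have htl := pv_headI_tail ls hc.1
        exact congrArg _ (ih m (ls.map List.tail) (by omega) (by omega))
    · rw [pv_pyZipGo_nil (n+1) ls hc, pv_pyZipGo_nil m ls hc]

theorem pv_pyZip_eq (ls : List (List Int)) :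
    pyZip ls = if ls ≠ [] ∧ ls.all (fun l => !l.isEmpty) then
      (ls.map (fun l => l.headI)) :: pyZip (ls.map List.tail)
    else [] := by
  by_cases hc : ls ≠ [] ∧ ls.all (fun l => !l.isEmpty)
  · rw [if_pos hc]
    unfold pyZip
    have hpos := pv_headI_pos ls hc
    obtain ⟨k, hk⟩ : ∃ k, ls.headI.length = k + 1 := ⟨ls.headI.length - 1, by omega⟩
    rw [hk]
    simp only [pyZipGo, if_pos hc]
    have htl := pv_headI_tail ls hc.1
    exact congrArg _ (pv_pyZipGo_fuel k _ (ls.map List.tail) (by omega) (by omega))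
  · rw [if_neg hc]
    exact pv_pyZipGo_nil _ ls hc

-- With nodup keys, lookup of a present pair's key returns exactly that pair's value.
theorem pv_lookup_of_mem {data : List (String × List Int)} (hnd : (data.map Prod.fst).Nodup)
    {kc : String × List Int} (hm : kc ∈ data) : data.lookup kc.1 = some kc.2 := by
  induction data with
  | nil => cases hm
  | cons hd tl ih =>
    simp only [List.map_cons, List.nodup_cons] at hnd
    cases hm with
    | head => simp [List.lookup]
    | tail _ hm =>
      have hne : hd.1 ≠ kc.1 := by
        intro h
        exact hnd.1 (h ▸ List.mem_map_of_mem hm)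
      have hb : (kc.1 == hd.1) = false := by
        simp [beq_eq_false_iff_ne]; exact fun h => hne h.symm
      simp [List.lookup, hb, ih hnd.2 hm]

-- Loop invariant for A's fold: the accumulator stays column-aligned with data.
theorem pv_foldA (data : List (String × List Int)) (startTime endTime : Int)
    (hnd : (data.map Prod.fst).Nodup) (ps : List (Int × Int)) (sel : List Int) :
    ps.foldl
      (fun acc p =>
        if startTime ≤ p.2 ∧ p.2 ≤ endTime then
          acc.map (fun kl => (kl.1, kl.2 ++ [pvColGet ((data.lookup kl.1).getD []) p.1]))
        else acc)
      (data.map (fun kc => (kc.1, sel.map (fun i => pvColGet kc.2 i)))) =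
    data.map (fun kc => (kc.1,
      (sel ++ (ps.filter (fun p => decide (startTime ≤ p.2 ∧ p.2 ≤ endTime))).map (·.1)).map
        (fun i => pvColGet kc.2 i))) := by
  induction ps generalizing sel with
  | nil => simp
  | cons p ps ih =>
    by_cases hp : startTime ≤ p.2 ∧ p.2 ≤ endTime
    · simp only [List.foldl_cons, if_pos hp]
      have hstep :
          (data.map (fun kc => (kc.1, sel.map (fun i => pvColGet kc.2 i)))).map
            (fun kl => (kl.1, kl.2 ++ [pvColGet ((data.lookup kl.1).getD []) p.1])) =
          data.map (fun kc => (kc.1, (sel ++ [p.1]).map (fun i => pvColGet kc.2 i))) := by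
        rw [List.map_map]
        refine List.map_congr_left (fun kc hm => ?_)
        simp [pv_lookup_of_mem hnd hm]
      rw [hstep, ih (sel ++ [p.1])]
      simp [hp]
    · simp only [List.foldl_cons, if_neg hp]
      rw [ih sel]
      simp [hp]

-- pyZip of equal-shape rows built over the same base list is the column-major map (transpose of a transpose).
theorem pv_pyZip_maps {α : Type} (js : List Nat) (hjs : js ≠ []) (data : List α) (g : Nat → α → Int) :
    pyZip (js.map (fun j => data.map (g j))) = data.map (fun a => js.map (fun j => g j a)) := by
  induction data with
  | nil =>
    rw [pv_pyZip_eq]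
    cases js with
    | nil => exact absurd rfl hjs
    | cons j js' => simp
  | cons a tl ih =>
    rw [pv_pyZip_eq]
    have hcond : (js.map (fun j => (a :: tl).map (g j))) ≠ [] ∧
        (js.map (fun j => (a :: tl).map (g j))).all (fun l => !l.isEmpty) := by
      constructor
      · simp [hjs]
      · simp
    rw [if_pos hcond]
    simp only [List.map_map]
    have h1 : js.map ((fun l => l.headI) ∘ fun j => (a :: tl).map (g j)) = js.map (fun j => g j a) := by
      simp [Function.comp, List.headI]
    have h2 : js.map (List.tail ∘ fun j => (a :: tl).map (g j)) = js.map (fun j => tl.map (g j)) := by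
      simp [Function.comp]
    rw [h1, h2, ih]
    simp

-- pyZip of ls with minimum length m is the list of the first m cross-sections.
theorem pv_pyZip_eq_range (m : Nat) : ∀ (ls : List (List Int)), ls ≠ [] →
    (∀ l ∈ ls, m ≤ l.length) → (∃ l ∈ ls, l.length = m) →
    pyZip ls = (List.range m).map (fun j => ls.map (fun l => l.getD j 0)) := by
  induction m with
  | zero =>
    intro ls hne hlb ⟨l, hl, hlen⟩
    rw [pv_pyZip_eq]
    rw [if_neg]
    · simp
    · rintro ⟨-, hall⟩
      have := List.all_eq_true.mp hall l hl
      simp [List.length_eq_zero_iff.mp hlen] at this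
  | succ m ih =>
    intro ls hne hlb hex
    rw [pv_pyZip_eq]
    have hall : ∀ l ∈ ls, l ≠ [] := by
      intro l hl h
      have := hlb l hl
      simp [h] at this
    rw [if_pos ⟨hne, by
      rw [List.all_eq_true]; intro l hl
      simpa [List.isEmpty_iff] using hall l hl⟩]
    have hrec : pyZip (ls.map List.tail) =
        (List.range m).map (fun j => (ls.map List.tail).map (fun l => l.getD j 0)) := by
      refine ih (ls.map List.tail) (by simpa using hne) ?_ ?_
      · intro t ht
        obtain ⟨l, hl, rfl⟩ := List.mem_map.mp ht
        have := hlb l hl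
        simp [List.length_tail]; omega
      · obtain ⟨l, hl, hlen⟩ := hex
        exact ⟨l.tail, List.mem_map_of_mem hl, by simp [List.length_tail, hlen]⟩
    rw [hrec]
    rw [List.range_succ_eq_map]
    simp only [List.map_cons, List.map_map]
    congr 1
    · refine List.map_congr_left (fun l hl => ?_)
      cases l with
      | nil => exact absurd rfl (hall _ hl)
      | cons a r => simp [List.headI]
    · refine List.map_congr_left (fun j _ => ?_)
      refine List.map_congr_left (fun l _ => ?_)
      cases l <;> simp

-- zip against a same-length replicate pairs every element with the constant.
theorem pv_zip_replicate {α β : Type} (l : List α) (a : β) :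
    l.zip (List.replicate l.length a) = l.map (fun x => (x, a)) := by
  induction l with
  | nil => rfl
  | cons x xs ih => simp [List.replicate_succ, ih]

-- ===== VERDICT =====
theorem reduceDataToTimeRange_spec : Claim_equal_reduceDataToTimeRange := by
  intro data timeKey startTime endTime _ hpre
  obtain ⟨hnd, ⟨kc, hmkc, hkeq⟩, hbound⟩ := hpre
  have hlk : data.lookup timeKey = some kc.2 := hkeq ▸ pv_lookup_of_mem hnd hmkc
  -- the minimum column length m
  obtain ⟨m, hmin⟩ : ∃ m, ((data.map (·.2)).map List.length).min? = some m := by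
    cases h : ((data.map (·.2)).map List.length).min? with
    | some m => exact ⟨m, rfl⟩
    | none =>
      rw [List.min?_eq_none_iff] at h
      simp at h
      exact absurd (h ▸ hmkc) (List.not_mem_nil)
  obtain ⟨hmmem, hmle⟩ := List.min?_eq_some_iff.mp hmin
  have hmle' : ∀ l ∈ data.map (·.2), m ≤ l.length := fun l hl =>
    hmle l.length (List.mem_map_of_mem hl)
  obtain ⟨kmin, hkminmem, hkminlen⟩ : ∃ kc'' ∈ data, kc''.2.length = m := by
    obtain ⟨l, hl, hlen⟩ := List.mem_map.mp hmmem
    obtain ⟨kc'', hkc'', h2⟩ := List.mem_map.mp hl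
    exact ⟨kc'', hkc'', by rw [h2, hlen]⟩
  have hmtc : m ≤ kc.2.length := hmle' kc.2 (List.mem_map_of_mem hmkc)
  -- the time-column predicate on a row index
  set q : Nat → Bool :=
    fun j => decide (startTime ≤ kc.2.getD j 0 ∧ kc.2.getD j 0 ≤ endTime) with hq
  set selNat : List Nat := (List.range kc.2.length).filter q with hselNat
  -- A's normal form
  have hA : reduceDataToTimeRange data timeKey startTime endTime =
      data.map (fun kc' => (kc'.1, selNat.map (fun j => kc'.2.getD j 0))) := by
    unfold reduceDataToTimeRange
    rw [hlk]
    have h0 := pv_foldA data startTime endTime hnd (PySem.List.enumerate kc.2) []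
    dsimp only
    simp only [List.map_nil, List.nil_append] at h0
    rw [h0]
    -- rewrite the Int index list as selNat cast to Int
    have hsel : ((PySem.List.enumerate kc.2).filter
          (fun p => decide (startTime ≤ p.2 ∧ p.2 ≤ endTime))).map (·.1) =
        List.map (fun (j : Nat) => (j : Int)) selNat := by
      rw [PySem.List.enumerate_eq_map_pyRange kc.2 0]
      have hlen : PySem.List.len kc.2 = ((kc.2.length : Nat) : Int) := by
        simp [PySem.List.len]
      rw [hlen, PySem.List.pyRange_zero_natCast, List.map_map, List.filter_map,
        List.map_map]
      simp [Function.comp_def, PySem.List.pyGetD_natCast, hselNat, hq]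
    rw [hsel]
    refine List.map_congr_left (fun kc' _ => ?_)
    congr 1
    rw [List.map_map]
    refine List.map_congr_left (fun j _ => ?_)
    simp [Function.comp, pvColGet, List.getD_eq_getElem?_getD]
  -- B's pieces
  have hcont : (data.map (·.1)).contains timeKey = true := by
    simp only [List.contains_iff_mem]
    exact hkeq ▸ List.mem_map_of_mem hmkc
  have hzip : pyZip (data.map (·.2)) =
      (List.range m).map (fun j => data.map (fun kc' => kc'.2.getD j 0)) := by
    rw [pv_pyZip_eq_range m (data.map (·.2))
      (by intro h; rw [List.map_eq_nil_iff] at h; exact absurd (h ▸ hmkc) List.not_mem_nil)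
      hmle' ⟨kmin.2, List.mem_map_of_mem hkminmem, hkminlen⟩]
    refine List.map_congr_left (fun j _ => ?_)
    simp [Function.comp_def]
  -- the time field of a cross-section row is the time column's entry
  have hti : ∀ j : Nat,
      ((PySem.List.pyGet? (data.map (fun kc' => kc'.2.getD j 0))
          (((data.map (·.1)).idxOf timeKey : Nat) : Int)).getD 0) = kc.2.getD j 0 := by
    intro j
    have htmem : timeKey ∈ data.map (·.1) := hkeq ▸ List.mem_map_of_mem hmkc
    have htlt : (data.map (·.1)).idxOf timeKey < data.length := by
      have := List.idxOf_lt_length_of_mem htmem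
      simpa using this
    set ti := (data.map (·.1)).idxOf timeKey with hti'
    have hkey : (data[ti]'htlt).1 = timeKey := by
      have h1 := List.getElem_idxOf (x := timeKey) (xs := data.map (·.1))
        (by simpa using htlt)
      simp only [List.getElem_map] at h1
      exact h1
    have htc : (data[ti]'htlt).2 = kc.2 := by
      have hm2 : data[ti]'htlt ∈ data := List.getElem_mem htlt
      have := pv_lookup_of_mem hnd hm2
      rw [hkey, hlk] at this
      exact (Option.some.inj this).symm
    rw [PySem.List.pyGet?_natCast]
    rw [List.getElem?_map, List.getElem?_eq_getElem htlt]
    simp [htc]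
  -- B's rows are the selected cross-sections
  have hrows : (pyZip (data.map (·.2))).filter
      (fun row => decide (startTime ≤
          (PySem.List.pyGet? row (((data.map (·.1)).idxOf timeKey : Nat) : Int)).getD 0 ∧
        (PySem.List.pyGet? row (((data.map (·.1)).idxOf timeKey : Nat) : Int)).getD 0 ≤ endTime)) =
      ((List.range m).filter q).map (fun j => data.map (fun kc' => kc'.2.getD j 0)) := by
    rw [hzip, List.filter_map]
    congr 1
    refine List.filter_congr (fun j _ => ?_)
    simp only [Function.comp_def]
    rw [hti j]
  -- the selection below m is the whole selection (Pre_: in-range indices are below every column length)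
  have hselm : (List.range m).filter q = selNat := by
    rw [hselNat]
    have hsplit : List.range kc.2.length = List.range m ++
        (List.range (kc.2.length - m)).map (fun k => m + k) := by
      rw [← List.range_add, Nat.add_sub_cancel' hmtc]
    rw [hsplit, List.filter_append]
    have hnil : ((List.range (kc.2.length - m)).map (fun k => m + k)).filter q = [] := by
      rw [List.filter_eq_nil_iff]
      rintro x hx hqx
      obtain ⟨k, hk, rfl⟩ := List.mem_map.mp hx
      rw [List.mem_range] at hk
      have hlt : m + k < kc.2.length := by omega
      have hqx' : startTime ≤ kc.2.getD (m + k) 0 ∧ kc.2.getD (m + k) 0 ≤ endTime := by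
        rw [hq] at hqx
        exact of_decide_eq_true hqx
      rw [List.getD_eq_getElem kc.2 0 hlt] at hqx'
      have hpmem : ((((m + k : Nat) : Int)), kc.2[m + k]) ∈ PySem.List.enumerate kc.2 := by
        rw [PySem.List.mem_enumerate_iff]
        exact ⟨m + k, hlt, by simp⟩
      have := hbound kc hmkc hkeq _ hpmem (by exact_mod_cast hqx')
        kmin hkminmem
      rw [hkminlen] at this
      have h2 : ((m + k : Nat) : Int) < (m : Int) := by simpa using this
      omega
    rw [hnil, List.append_nil]
  -- assemble B
  unfold Spec_reduceDataToTimeRange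
  rw [hA]
  unfold reduceDataToTimeRange_alt
  simp only [hcont, if_pos, hrows, hselm]
  by_cases hsel0 : selNat = []
  · rw [hsel0]
    have hz : (List.map (fun x => x.1) data).zip
        (List.replicate (List.map (fun x => x.1) data).length ([] : List Int)) =
        (List.map (fun x => x.1) data).map (fun x => (x, ([] : List Int))) :=
      pv_zip_replicate _ _
    simp only [List.length_map] at hz
    simp [hz, Function.comp_def]
  · have hne : selNat.map (fun j => data.map (fun kc' => kc'.2.getD j 0)) ≠ [] := by
      simpa using hsel0
    have : (selNat.map (fun j => data.map (fun kc' => kc'.2.getD j 0))).isEmpty = false := by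
      simpa using hne
    rw [this]
    simp only [Bool.false_eq_true, if_neg, not_false_iff]
    rw [pv_pyZip_maps selNat hsel0 data (fun j kc' => kc'.2.getD j 0)]
    rw [List.zip_map']
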